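-- pv_equiv track=rewrite | github.com/antho77m/Azul | Azul_sys_avant_jeu.py | preparation_une_usine
-- ===== SOURCE A (Python) =====
-- def preparation_une_usine(sac_tuile):
--     '''prépare une usine en plaçant 4 tuiles dans une usine,les tuiles sont enlevé du sac de tuile
--         la fonction retourne une usine (c'est a dire,une matrice de 2*2 )
--     >>> a=[1, 2, 1, 1, 2, 4, 5, 6]
--     >>> preparation_une_usine(a)
--     [[6, 5], [4, 2]]
--     >>> print (a)
--     [1, 2, 1, 1]
--     '''
--     usine=[]
--     for i in range(2):
--         ligne_usine=[]
--         for j in range(2):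
--             if sac_tuile:
--                 ligne_usine.append(sac_tuile.pop())
--             else:
--                 ligne_usine.append(0)
--         usine.append(ligne_usine)
--     return usine
-- ===== SOURCE B (Python) =====
-- def preparation_une_usine(sac_tuile):
--     flat = sac_tuile[-4:][::-1]
--     del sac_tuile[-4:]
--     flat += [0] * (4 - len(flat))
--     return [flat[0:2], flat[2:4]]
-- ===== Notes on version B (the rewrite author's own statement) =====
-- stated objective: simpler
-- what changed: Replaces A's nested 2x2 loop that interleaves popping and row-building with a flat extract-then-reshape: slice the last up-to-4 elements reversed, delete that tail slice (same mutation), pad with zeros to length 4, and chunk into [flat[0:2], flat[2:4]].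
import Mathlib
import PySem

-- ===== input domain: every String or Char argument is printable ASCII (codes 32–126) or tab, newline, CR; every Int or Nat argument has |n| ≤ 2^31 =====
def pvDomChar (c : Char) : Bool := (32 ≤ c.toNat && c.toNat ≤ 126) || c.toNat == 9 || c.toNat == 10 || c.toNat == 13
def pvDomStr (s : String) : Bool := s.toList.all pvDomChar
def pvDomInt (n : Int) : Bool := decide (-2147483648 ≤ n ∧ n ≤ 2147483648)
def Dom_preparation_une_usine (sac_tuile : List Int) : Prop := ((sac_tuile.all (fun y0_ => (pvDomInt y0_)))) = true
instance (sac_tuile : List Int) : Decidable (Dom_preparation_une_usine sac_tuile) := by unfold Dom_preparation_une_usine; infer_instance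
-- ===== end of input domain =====

-- B replaces A's interleaved pop-and-build nested loops by extract-then-reshape (slice tail, pad, chunk); objective: simpler.
-- Both A and B mutate the argument (removing the last up-to-4 elements identically); the proof is about the return value.


-- ===== PORT A =====
-- for i in range(2): build a row by popping twice (0 if the bag is empty), append the row.
def preparation_une_usine (sac_tuile : List Int) : List (List Int) :=
  let st := (List.range 2).foldl
    (fun (st : List Int × List (List Int)) (_ : Nat) =>
      let inner := (List.range 2).foldl
        (fun (st2 : List Int × List Int) (_ : Nat) =>
          if st2.1 ≠ [] then (st2.1.dropLast, st2.2 ++ [st2.1.getLastD 0])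
          else (st2.1, st2.2 ++ [0]))
        (st.1, ([] : List Int))
      (inner.1, st.2 ++ [inner.2]))
    (sac_tuile, ([] : List (List Int)))
  st.2

-- ===== PORT B =====
-- flat = sac_tuile[-4:][::-1]; pad with zeros to length 4; return [flat[0:2], flat[2:4]].
def preparation_une_usine_alt (sac_tuile : List Int) : List (List Int) :=
  let flat0 := (PySem.List.slice sac_tuile (some (-4)) none).reverse
  let flat := flat0 ++ List.replicate (4 - flat0.length) 0
  [PySem.List.slice flat (some 0) (some 2), PySem.List.slice flat (some 2) (some 4)]

-- ===== PRECONDITION & SPEC =====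
def Spec_preparation_une_usine (sac_tuile : List Int) (out : List (List Int)) : Prop := out = preparation_une_usine_alt sac_tuile
instance (sac_tuile : List Int) (out : List (List Int)) : Decidable (Spec_preparation_une_usine sac_tuile out) := by unfold Spec_preparation_une_usine; infer_instance

-- ===== CLAIM (what is proved, stated in full; the proofs are below) =====
def Claim_equal_preparation_une_usine : Prop := ∀ (sac_tuile : List Int), Dom_preparation_une_usine sac_tuile → Spec_preparation_une_usine sac_tuile (preparation_une_usine sac_tuile)

-- ===== LEMMAS AND PROOFS =====
theorem prep_eq (sac : List Int) : preparation_une_usine sac = preparation_une_usine_alt sac := by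
  have h : sac = sac.reverse.reverse := (List.reverse_reverse sac).symm
  rw [h]
  rcases sac.reverse with _ | ⟨a, _ | ⟨b, _ | ⟨c, _ | ⟨d, t⟩⟩⟩⟩
  · rfl
  · simp [preparation_une_usine, preparation_une_usine_alt, List.range_succ, PySem.List.slice]
  · simp [preparation_une_usine, preparation_une_usine_alt, List.range_succ, PySem.List.slice]
  · simp [preparation_une_usine, preparation_une_usine_alt, List.range_succ, PySem.List.slice]
  · have hrev : (a :: b :: c :: d :: t).reverse = t.reverse ++ [d, c, b, a] := by
      simp
    rw [hrev]
    simp [preparation_une_usine, preparation_une_usine_alt, List.range_succ, PySem.List.slice]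

-- ===== VERDICT (by name: the statement is the Claim_ definition above) =====
theorem preparation_une_usine_spec : Claim_equal_preparation_une_usine := by
  intro sac _
  exact prep_eq sac
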